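-- pv_equiv track=rewrite | github.com/oyi77/1ai-ebook | src/export/epub_generator.py | _parse_manuscript
-- ===== SOURCE A (Python) =====
-- def _parse_manuscript(content: str) -> list[dict]:
--     """Split manuscript on ## chapter boundaries. Returns list of {title, body}."""
--     chapters = []
--     current_title = None
--     current_lines: list[str] = []
--
--     for line in content.splitlines():
--         if line.startswith("## "):
--             if current_title is not None:
--                 chapters.append({"title": current_title, "body": "\n".join(current_lines)})
--             current_title = line[3:].strip()
--             current_lines = []
--         else:
--             if current_title is not None:
--                 current_lines.append(line)
--             # Lines before first ## are ignored (preamble / # title)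
--
--     if current_title is not None:
--         chapters.append({"title": current_title, "body": "\n".join(current_lines)})
--
--     return chapters
-- ===== SOURCE B (Python) =====
-- def _parse_manuscript(content: str) -> list[dict]:
--     """Two-phase: index the '## ' boundary lines, then slice bodies between consecutive boundaries."""
--     lines = content.splitlines()
--     bounds = [(i, l) for i, l in enumerate(lines) if l.startswith("## ")]
--     ends = [i for i, _ in bounds[1:]] + [len(lines)]
--     return [{"title": l[3:].strip(), "body": "\n".join(lines[i + 1 : e])}
--             for (i, l), e in zip(bounds, ends)]
-- ===== Notes on version B (the rewrite author's own statement) =====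
-- stated objective: alternative
-- what changed: Replaces A's single-pass accumulator state machine (current_title/current_lines mutated per line) with a two-phase plan: first build an index table of the '## ' boundary lines via enumerate, then emit each chapter by slicing the body between consecutive boundary indices.
import Mathlib
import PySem

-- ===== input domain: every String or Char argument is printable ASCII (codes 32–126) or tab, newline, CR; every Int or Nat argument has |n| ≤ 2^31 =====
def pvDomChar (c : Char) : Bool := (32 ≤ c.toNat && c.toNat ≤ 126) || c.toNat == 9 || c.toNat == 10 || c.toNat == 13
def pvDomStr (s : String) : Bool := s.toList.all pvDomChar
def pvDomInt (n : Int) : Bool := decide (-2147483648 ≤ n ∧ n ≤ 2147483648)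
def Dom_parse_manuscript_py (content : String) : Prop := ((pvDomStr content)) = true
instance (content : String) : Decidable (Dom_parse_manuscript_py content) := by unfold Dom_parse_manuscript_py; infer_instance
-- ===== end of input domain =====

-- B replaces A's single-pass accumulator state machine by a two-phase plan (index the '## '
-- boundary lines, then slice each body between consecutive boundaries); objective: alternative.

-- ===== PORT A =====
-- state = (chapters, current_title, current_lines), exactly A's loop body
def pvStepA (st : List (List (String × String)) × Option String × List String) (line : String) :
    List (List (String × String)) × Option String × List String :=
  if PySem.Str.startswith line "## " then
    let chapters := match st.2.1 with
      | some t => st.1 ++ [[("title", t), ("body", PySem.Str.join "\n" st.2.2)]]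
      | none => st.1
    (chapters, some (PySem.Str.strip (PySem.Str.slice line (some 3) none)), [])
  else
    match st.2.1 with
    | some _ => (st.1, st.2.1, st.2.2 ++ [line])
    | none => st

-- the trailing 'if current_title is not None: chapters.append(…)'
def pvFinalizeA (st : List (List (String × String)) × Option String × List String) :
    List (List (String × String)) :=
  match st.2.1 with
  | some t => st.1 ++ [[("title", t), ("body", PySem.Str.join "\n" st.2.2)]]
  | none => st.1

def parse_manuscript_py (content : String) : List (List (String × String)) :=
  pvFinalizeA ((PySem.Str.splitlines content).foldl pvStepA ([], none, []))

-- ===== PORT B =====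
def parse_manuscript_py_alt (content : String) : List (List (String × String)) :=
  let lines := PySem.Str.splitlines content
  let bounds := (PySem.List.enumerate lines 0).filter (fun p => PySem.Str.startswith p.2 "## ")
  let ends := (PySem.List.slice bounds (some 1) none).map (fun p => p.1) ++ [(lines.length : Int)]
  (bounds.zip ends).map (fun be =>
    [("title", PySem.Str.strip (PySem.Str.slice be.1.2 (some 3) none)),
     ("body", PySem.Str.join "\n" (PySem.List.slice lines (some (be.1.1 + 1)) (some be.2)))])

-- ===== PRECONDITION & SPEC =====
def Spec_parse_manuscript_py (content : String) (out : List (List (String × String))) : Prop := out = parse_manuscript_py_alt content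
instance (content : String) (out : List (List (String × String))) : Decidable (Spec_parse_manuscript_py content out) := by unfold Spec_parse_manuscript_py; infer_instance

-- ===== CLAIM (what is proved, stated in full; the proofs are below) =====
def Claim_equal_parse_manuscript_py : Prop := ∀ (content : String), Dom_parse_manuscript_py content → Spec_parse_manuscript_py content (parse_manuscript_py content)

-- ===== LEMMAS AND PROOFS =====

def pvHdr (l : String) : Bool := PySem.Str.startswith l "## "

def pvMk (l : String) (body : List String) : List (String × String) :=
  [("title", PySem.Str.strip (PySem.Str.slice l (some 3) none)), ("body", PySem.Str.join "\n" body)]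

-- common shape: the chapter list, one chunk per '## ' line
def pvChunks : List String → List (List (String × String))
  | [] => []
  | l :: ls =>
    if pvHdr l then
      pvMk l (ls.takeWhile (fun x => !pvHdr x)) :: pvChunks (ls.dropWhile (fun x => !pvHdr x))
    else pvChunks ls
termination_by ls => ls.length
decreasing_by
  · simpa using Nat.lt_succ_of_le (List.length_dropWhile_le _ ls)
  · simp

lemma pvChunks_nil : pvChunks [] = [] := by rw [pvChunks.eq_def]

lemma pvChunks_cons (l : String) (ls : List String) :
    pvChunks (l :: ls) =
      if pvHdr l then
        pvMk l (ls.takeWhile (fun x => !pvHdr x)) :: pvChunks (ls.dropWhile (fun x => !pvHdr x))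
      else pvChunks ls := by
  rw [pvChunks.eq_def]

lemma pvChunks_dropWhile (ls : List String) :
    pvChunks (ls.dropWhile (fun x => !pvHdr x)) = pvChunks ls := by
  induction ls with
  | nil => rfl
  | cons l ls ih =>
    by_cases h : pvHdr l
    · simp [h]
    · rw [pvChunks_cons]; simp [h, ih]

-- ===== A-side =====

lemma pvA_some (ls : List String) (ch : List (List (String × String))) (t : String) (acc : List String) :
    pvFinalizeA (ls.foldl pvStepA (ch, some t, acc)) =
      ch ++ [[("title", t), ("body", PySem.Str.join "\n" (acc ++ ls.takeWhile (fun x => !pvHdr x)))]]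
        ++ pvChunks (ls.dropWhile (fun x => !pvHdr x)) := by
  induction ls generalizing ch t acc with
  | nil => simp [pvFinalizeA, pvChunks_nil]
  | cons l ls ih =>
    by_cases h : pvHdr l
    · have hs : pvStepA (ch, some t, acc) l =
        (ch ++ [[("title", t), ("body", PySem.Str.join "\n" acc)]],
          some (PySem.Str.strip (PySem.Str.slice l (some 3) none)), []) := by
        simp [pvStepA, pvHdr] at h ⊢; simp [h]
      rw [List.foldl_cons, hs, ih]
      simp [List.takeWhile_cons, h, pvChunks_cons, pvMk, List.append_assoc]
    · have hs : pvStepA (ch, some t, acc) l = (ch, some t, acc ++ [l]) := by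
        simp [pvStepA, pvHdr] at h ⊢; simp [h]
      rw [List.foldl_cons, hs, ih]
      simp [List.takeWhile_cons, h]

lemma pvA_none (ls : List String) (ch : List (List (String × String))) (acc : List String) :
    pvFinalizeA (ls.foldl pvStepA (ch, none, acc)) = ch ++ pvChunks ls := by
  induction ls generalizing ch acc with
  | nil => simp [pvFinalizeA, pvChunks_nil]
  | cons l ls ih =>
    by_cases h : pvHdr l
    · have hs : pvStepA (ch, none, acc) l =
        (ch, some (PySem.Str.strip (PySem.Str.slice l (some 3) none)), []) := by
        simp [pvStepA, pvHdr] at h ⊢; simp [h]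
      rw [List.foldl_cons, hs, pvA_some, pvChunks_cons]
      simp [h, pvMk]
    · have hs : pvStepA (ch, none, acc) l = (ch, none, acc) := by
        simp [pvStepA, pvHdr] at h ⊢; simp [h]
      rw [List.foldl_cons, hs, ih, pvChunks_cons]
      simp [h]

lemma pvA_eq_chunks (content : String) :
    parse_manuscript_py content = pvChunks (PySem.Str.splitlines content) := by
  rw [parse_manuscript_py, pvA_none, List.nil_append]

-- ===== B-side =====

def pvBnds (ls : List String) : List (Int × String) :=
  (PySem.List.enumerate ls 0).filter (fun p => pvHdr p.2)

def pvEnds (ls : List String) : List Int :=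
  (pvBnds ls).tail.map (fun p => p.1) ++ [(ls.length : Int)]

def pvBfun (ls : List String) : List (List (String × String)) :=
  ((pvBnds ls).zip (pvEnds ls)).map
    (fun be => pvMk be.1.2 (PySem.List.slice ls (some (be.1.1 + 1)) (some be.2)))

lemma pvAlt_eq_Bfun (content : String) :
    parse_manuscript_py_alt content = pvBfun (PySem.Str.splitlines content) := by
  simp only [parse_manuscript_py_alt, pvBfun, pvBnds, pvEnds, pvMk, pvHdr,
    PySem.List.slice_from_one]

lemma pvEnumerate_shift {α : Type} (ls : List α) (s : Int) :
    PySem.List.enumerate ls (s + 1) = (PySem.List.enumerate ls s).map (fun p => (p.1 + 1, p.2)) := by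
  induction ls generalizing s with
  | nil => simp [PySem.List.enumerate_nil]
  | cons x xs ih => rw [PySem.List.enumerate_cons, PySem.List.enumerate_cons, ih (s + 1)]; simp

lemma pvBnds_cons (l : String) (ls : List String) :
    pvBnds (l :: ls) =
      (if pvHdr l then [((0 : Int), l)] else []) ++ (pvBnds ls).map (fun p => (p.1 + 1, p.2)) := by
  rw [pvBnds, PySem.List.enumerate_cons, pvEnumerate_shift ls 0]
  by_cases h : pvHdr l <;> simp [h, List.filter_map, Function.comp_def, pvBnds]

lemma pvBnds_nonneg (ls : List String) : ∀ p ∈ pvBnds ls, 0 ≤ p.1 := by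
  intro p hp
  have := List.mem_of_mem_filter hp
  rcases (PySem.List.mem_enumerate_iff _ _ _).1 this with ⟨k, hk, rfl⟩
  simp

lemma pvEnds_nonneg (ls : List String) : ∀ e ∈ pvEnds ls, 0 ≤ e := by
  intro e he
  rcases List.mem_append.1 he with h | h
  · rcases List.mem_map.1 h with ⟨p, hp, rfl⟩
    exact pvBnds_nonneg ls p (List.mem_of_mem_tail hp)
  · simp at h; omega

def pvFirstB (ls : List String) : Int :=
  match pvBnds ls with
  | [] => (ls.length : Int)
  | p :: _ => p.1

lemma pvFirstB_nonneg (ls : List String) : 0 ≤ pvFirstB ls := by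
  rw [pvFirstB]
  cases h : pvBnds ls with
  | nil => simp
  | cons p _ => exact pvBnds_nonneg ls p (h ▸ List.mem_cons_self ..)

lemma pvFirstB_cons_neg (l : String) (ls : List String) (h : pvHdr l = false) :
    pvFirstB (l :: ls) = pvFirstB ls + 1 := by
  rw [pvFirstB, pvFirstB, pvBnds_cons, h]
  cases pvBnds ls with
  | nil => simp
  | cons p _ => simp

lemma pvTake_firstB (ls : List String) :
    ls.take (pvFirstB ls).toNat = ls.takeWhile (fun x => !pvHdr x) := by
  induction ls with
  | nil => simp
  | cons l ls ih =>
    by_cases h : pvHdr l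
    · have : pvFirstB (l :: ls) = 0 := by rw [pvFirstB, pvBnds_cons, h]; simp
      simp [this, h]
    · rw [pvFirstB_cons_neg l ls (by simpa using h)]
      have h0 := pvFirstB_nonneg ls
      have : (pvFirstB ls + 1).toNat = (pvFirstB ls).toNat + 1 := by omega
      simp [this, h, ih]

lemma pvSlice_shift {α : Type} (x : α) (xs : List α) (a b : Int) (ha : 0 ≤ a) (hb : 0 ≤ b) :
    PySem.List.slice (x :: xs) (some (a + 1)) (some (b + 1)) = PySem.List.slice xs (some a) (some b) := by
  rw [PySem.List.slice_toNat (x :: xs) (show (0:Int) ≤ a + 1 by omega) (show (0:Int) ≤ b + 1 by omega),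
    PySem.List.slice_toNat xs ha hb]
  have h1 : (a + 1).toNat = a.toNat + 1 := by omega
  have h2 : (b + 1).toNat = b.toNat + 1 := by omega
  rw [h1, h2, List.drop_succ_cons, Nat.succ_sub_succ]

lemma pvBnds_nil_all (ls : List String) (h : pvBnds ls = []) : ∀ x ∈ ls, pvHdr x = false := by
  intro x hx
  have : ∃ p ∈ PySem.List.enumerate ls 0, p.2 = x := by
    have : x ∈ (PySem.List.enumerate ls 0).map (fun p => p.2) := by
      rw [PySem.List.map_snd_enumerate]; exact hx
    rcases List.mem_map.1 this with ⟨p, hp, rfl⟩; exact ⟨p, hp, rfl⟩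
  rcases this with ⟨p, hp, rfl⟩
  by_contra hc
  have : p ∈ pvBnds ls := List.mem_filter.2 ⟨hp, by simpa using hc⟩
  simp [h] at this

-- tail part of B on (l :: ls) equals B on ls, for any way the ends list continues
lemma pvZip_tail (l : String) (ls : List String) (E : List Int)
    (hE : E = (pvEnds ls).map (fun e => e + 1)) :
    (((pvBnds ls).map (fun p => (p.1 + 1, p.2))).zip E).map
      (fun be => pvMk be.1.2 (PySem.List.slice (l :: ls) (some (be.1.1 + 1)) (some be.2)))
      = pvBfun ls := by
  subst hE
  rw [List.zip_map, pvBfun, List.map_map]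
  refine List.map_congr_left ?_
  intro be hbe
  have h1 : 0 ≤ be.1.1 := pvBnds_nonneg ls be.1 (List.of_mem_zip hbe).1
  have h2 : 0 ≤ be.2 := pvEnds_nonneg ls be.2 (List.of_mem_zip hbe).2
  simp [Prod.map]
  rw [show be.1.1 + 1 + 1 = (be.1.1 + 1) + 1 by ring, pvSlice_shift l ls (be.1.1 + 1) be.2 (by omega) h2]

lemma pvB_eq_chunks (ls : List String) : pvBfun ls = pvChunks ls := by
  induction ls with
  | nil => simp [pvBfun, pvBnds, pvChunks_nil]
  | cons l ls ih =>
    by_cases h : pvHdr l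
    · -- header: first chunk from slice 1..firstB+1, tail shifts onto pvBfun ls
      rw [pvChunks_cons, if_pos h]
      have hbnds : pvBnds (l :: ls) = ((0 : Int), l) :: (pvBnds ls).map (fun p => (p.1 + 1, p.2)) := by
        rw [pvBnds_cons, h]; simp
      have hlen : ((l :: ls).length : Int) = (ls.length : Int) + 1 := by simp
      cases hb : pvBnds ls with
      | nil =>
        have hEnds : pvEnds (l :: ls) = [(ls.length : Int) + 1] := by
          rw [pvEnds, hbnds, hb, hlen]; simp
        have hfb : pvFirstB ls = (ls.length : Int) := by rw [pvFirstB, hb]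
        have hall := pvBnds_nil_all ls hb
        have htw : ls.takeWhile (fun x => !pvHdr x) = ls := by
          rw [List.takeWhile_eq_self_iff]; intro x hx; simp [hall x hx]
        have hdw : ls.dropWhile (fun x => !pvHdr x) = [] := by
          rw [List.dropWhile_eq_nil_iff]; intro x hx; simp [hall x hx]
        rw [pvBfun, hbnds, hEnds, hb]
        simp only [List.map_nil, List.zip_cons_cons, List.zip_nil_left, List.map_cons, List.map_nil]
        rw [show (0 : Int) + 1 = 0 + 1 by ring,
          pvSlice_shift l ls 0 (ls.length : Int) le_rfl (by positivity)]
        rw [PySem.List.slice_zero_start, PySem.List.slice_to _ (by positivity)]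
        simp [htw, hdw, pvChunks_nil]
      | cons b bt =>
        have hEnds : pvEnds (l :: ls) = (pvFirstB ls + 1) :: (pvEnds ls).map (fun e => e + 1) := by
          rw [pvEnds, hbnds, hb, pvEnds, hb, pvFirstB, hb, hlen]; simp
        rw [pvBfun, hbnds, hEnds, List.zip_cons_cons, List.map_cons]
        rw [pvZip_tail l ls _ rfl, ih, pvChunks_dropWhile]
        congr 1
        rw [show (0 : Int) + 1 = 0 + 1 by ring,
          pvSlice_shift l ls 0 (pvFirstB ls) le_rfl (pvFirstB_nonneg ls)]
        rw [PySem.List.slice_zero_start, PySem.List.slice_to _ (pvFirstB_nonneg ls)]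
        rw [pvTake_firstB]
    · -- not a header: everything shifts by one, result is pvBfun ls
      rw [pvChunks_cons, if_neg h, ← ih]
      have hbnds : pvBnds (l :: ls) = (pvBnds ls).map (fun p => (p.1 + 1, p.2)) := by
        rw [pvBnds_cons]; simp [h]
      have hEnds : pvEnds (l :: ls) = (pvEnds ls).map (fun e => e + 1) := by
        rw [pvEnds, pvEnds, hbnds]
        rw [← List.map_tail, List.map_map, List.map_append, List.map_map]
        congr 1
      rw [pvBfun, hbnds, hEnds, pvZip_tail l ls _ rfl]

-- ===== VERDICT (by name: the statement is the Claim_ definition above) =====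
theorem parse_manuscript_py_spec : Claim_equal_parse_manuscript_py := by
  intro content _
  unfold Spec_parse_manuscript_py
  rw [pvA_eq_chunks, pvAlt_eq_Bfun, pvB_eq_chunks]
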